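-- pv_equiv track=rewrite | github.com/Nilsolk/labsRPP | lab_1/lab1.py | method_without_std
-- ===== SOURCE A (Python) =====
-- def in_list_manual(lst, x):
--     for elem in lst:
--         if elem == x:
--             return True
--     return False
--
-- def method_without_std(A, B):
--     """
--     Метод без стандартных функций.
--     Удаляет цепочки нечетных элементов, если в них нет элементов из B.
--     """
--     result = []
--     i = 0
--
--     while i < len(A):
--         if A[i] % 2 == 0:
--             result.append(A[i])
--             i += 1
--         else:
--             start = i
--             found = False
--
--             while i < len(A) and A[i] % 2 != 0:
--                 if in_list_manual(B, A[i]):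
--                     found = True
--                 i += 1
--
--             if found:
--                 j = start
--                 while j < i:
--                     result.append(A[j])
--                     j += 1
--
--     return result
-- ===== SOURCE B (Python) =====
-- def _sweep(A, bs):
--     # flags[i] is True iff A[i] is odd and some element of bs occurs at or
--     # before position i within A[i]'s maximal run of consecutive odd elements
--     flags = []
--     flag = False
--     for x in A:
--         if x % 2 == 0:
--             flag = False
--         elif x in bs:
--             flag = True
--         flags.append(flag)
--     return flags
--
-- def method_without_std(A, B):
--     bs = set(B)
--     fwd = _sweep(A, bs)
--     bwd = _sweep(A[::-1], bs)[::-1]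
--     return [x for x, f, g in zip(A, fwd, bwd) if x % 2 == 0 or f or g]
-- ===== Notes on version B (the rewrite author's own statement) =====
-- stated objective: faster
-- what changed: Replaced A's index-based nested while scan over odd runs (with a linear hand-written membership scan of B per odd element) by a mask algorithm: B is put in a set once, two directional sweeps (forward, and backward via the reversed list) compute per-element keep flags, and a zip-filter selects the kept elements.
import Mathlib
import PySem

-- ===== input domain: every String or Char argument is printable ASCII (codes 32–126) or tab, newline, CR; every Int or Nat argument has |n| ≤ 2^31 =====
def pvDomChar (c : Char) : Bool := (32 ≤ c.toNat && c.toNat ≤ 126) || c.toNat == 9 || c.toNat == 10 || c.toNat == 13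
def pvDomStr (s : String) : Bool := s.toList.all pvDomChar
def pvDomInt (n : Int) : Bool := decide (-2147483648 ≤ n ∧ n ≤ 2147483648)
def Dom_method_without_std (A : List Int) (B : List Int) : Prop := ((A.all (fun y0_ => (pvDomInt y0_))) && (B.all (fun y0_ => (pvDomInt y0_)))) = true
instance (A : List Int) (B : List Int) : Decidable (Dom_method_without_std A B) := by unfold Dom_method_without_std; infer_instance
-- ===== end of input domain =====

-- B replaces A's index-based nested run scan by a mask algorithm: a set of B plus two
-- directional membership sweeps and a zip-filter (objective: faster, measured by the check).


-- ===== PORT A =====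
def inListManual (lst : List Int) (x : Int) : Bool :=
  match lst with
  | [] => false
  | e :: rest => if e == x then true else inListManual rest x

-- inner 'while i < len(A) and A[i] % 2 != 0' loop: returns (chunk, found, remaining)
def takeOddRun (Bl : List Int) : List Int → Bool → List Int × Bool × List Int
  | [], found => ([], found, [])
  | x :: xs, found =>
    if (PySem.Int.mod x 2 != 0) then
      let t := takeOddRun Bl xs (if inListManual Bl x then true else found)
      (x :: t.1, t.2.1, t.2.2)
    else ([], found, x :: xs)

theorem takeOddRun_rem_le (Bl : List Int) : ∀ (xs : List Int) (f : Bool),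
    (takeOddRun Bl xs f).2.2.length ≤ xs.length := by
  intro xs
  induction xs with
  | nil => intro f; simp [takeOddRun]
  | cons x xs ih =>
    intro f
    simp only [takeOddRun]
    split
    · exact Nat.le_succ_of_le (ih _)
    · simp

theorem takeOddRun_rem_lt (Bl : List Int) (x : Int) (xs : List Int) (f : Bool)
    (h : ¬ (PySem.Int.mod x 2 == 0) = true) :
    (takeOddRun Bl (x :: xs) f).2.2.length < (x :: xs).length := by
  have h' : (PySem.Int.mod x 2 != 0) = true := by
    simp only [bne] at *; simpa using h
  simp only [takeOddRun, h', if_pos]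
  exact Nat.lt_succ_of_le (takeOddRun_rem_le Bl xs _)

def goA (Bl : List Int) : List Int → List Int → List Int
  | [], result => result
  | x :: xs, result =>
    if h : (PySem.Int.mod x 2 == 0) = true then goA Bl xs (result ++ [x])
    else
      let t := takeOddRun Bl (x :: xs) false
      goA Bl t.2.2 (if t.2.1 then result ++ t.1 else result)
termination_by rest _ => rest.length
decreasing_by
  · simp
  · exact takeOddRun_rem_lt Bl x xs false h

def method_without_std (A : List Int) (B : List Int) : List Int := goA B A []

-- ===== PORT B =====
-- _sweep in Source B: one pass carrying a flag, appending it after each element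
def sweepB (Bl : List Int) : List Int → Bool → List Bool
  | [], _ => []
  | x :: xs, flag =>
    let f := if PySem.Int.mod x 2 == 0 then false
             else if Bl.contains x then true else flag
    f :: sweepB Bl xs f

-- the final list comprehension over zip(A, fwd, bwd) (zip truncates at the shortest)
def zipFilterB : List Int → List Bool → List Bool → List Int
  | x :: xs, f :: fs, g :: gs =>
      if (PySem.Int.mod x 2 == 0) || f || g then x :: zipFilterB xs fs gs
      else zipFilterB xs fs gs
  | _, _, _ => []

def method_without_std_alt (A : List Int) (B : List Int) : List Int :=
  let bs := PySem.Set.ofList B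
  let fwd := sweepB bs A false
  let bwd := (sweepB bs A.reverse false).reverse
  zipFilterB A fwd bwd

-- ===== PRECONDITION & SPEC =====
def Spec_method_without_std (A : List Int) (B : List Int) (out : List Int) : Prop := out = method_without_std_alt A B
instance (A : List Int) (B : List Int) (out : List Int) : Decidable (Spec_method_without_std A B out) := by unfold Spec_method_without_std; infer_instance

-- ===== CLAIM (what is proved, stated in full; the proofs are below) =====
def Claim_equal_method_without_std : Prop := ∀ (A : List Int) (B : List Int), Dom_method_without_std A B → Spec_method_without_std A B (method_without_std A B)

-- ===== LEMMAS AND PROOFS =====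

theorem inListManual_eq_contains (l : List Int) (x : Int) : inListManual l x = l.contains x := by
  induction l with
  | nil => simp [inListManual]
  | cons e rest ih =>
    by_cases he : e = x
    · simp [inListManual, he]
    · have hxe : ¬ x = e := fun hh => he hh.symm
      simp [inListManual, he, hxe, ih]

theorem boolIfOr (c f : Bool) : (if c = true then true else f) = (f || c) := by
  cases c <;> cases f <;> rfl

theorem boolIfOr' (c f t : Bool) : ((if c = true then true else f) || t) = (f || (c || t)) := by
  cases c <;> cases f <;> cases t <;> rfl

-- the parity predicate of both programs, and the canonical run recursion F
def oddP (x : Int) : Bool := !(PySem.Int.mod x 2 == 0)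

def F (Bl : List Int) : List Int → List Int
  | [] => []
  | x :: xs =>
    if h : (PySem.Int.mod x 2 == 0) = true then x :: F Bl xs
    else
      let t := takeOddRun Bl (x :: xs) false
      (if t.2.1 then t.1 else []) ++ F Bl t.2.2
termination_by xs => xs.length
decreasing_by
  · simp
  · exact takeOddRun_rem_lt Bl x xs false h

theorem takeOddRun_eq (Bl : List Int) : ∀ (xs : List Int) (f : Bool),
    takeOddRun Bl xs f =
      (xs.takeWhile oddP,
       f || (xs.takeWhile oddP).any (fun e => Bl.contains e),
       xs.dropWhile oddP) := by
  intro xs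
  induction xs with
  | nil => intro f; simp [takeOddRun, List.takeWhile, List.dropWhile]
  | cons x xs ih =>
    intro f
    by_cases h : (PySem.Int.mod x 2 == 0) = true
    · have ho : oddP x = false := by simp only [oddP, h, Bool.not_true]
      have h' : (PySem.Int.mod x 2 != 0) = false := by simp only [bne, h, Bool.not_true]
      simp only [takeOddRun, h', Bool.false_eq_true, if_false, List.takeWhile_cons, ho,
        List.dropWhile_cons, List.any_nil, Bool.or_false]
    · have hx0 : (PySem.Int.mod x 2 == 0) = false := Bool.eq_false_iff.mpr h
      have ho : oddP x = true := by simp only [oddP, hx0, Bool.not_false]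
      have h' : (PySem.Int.mod x 2 != 0) = true := by simp only [bne, hx0, Bool.not_false]
      simp only [takeOddRun, h', if_pos, ih, List.takeWhile_cons, List.dropWhile_cons, ho,
        if_pos, inListManual_eq_contains, List.any_cons]
      exact congrArg₂ Prod.mk rfl (congrArg₂ Prod.mk (boolIfOr' _ _ _) rfl)

theorem goA_eq_F (Bl : List Int) : ∀ (n : Nat) (xs : List Int), xs.length = n →
    ∀ (r : List Int), goA Bl xs r = r ++ F Bl xs := by
  intro n
  induction n using Nat.strong_induction_on with
  | _ n ih =>
    intro xs hlen r
    match xs with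
    | [] => simp [goA, F]
    | x :: xs =>
      have hlen' : xs.length + 1 = n := by simpa using hlen
      by_cases h : (PySem.Int.mod x 2 == 0) = true
      · have e1 : goA Bl (x :: xs) r = goA Bl xs (r ++ [x]) := by
          simp only [goA, dif_pos h]
        have e2 : F Bl (x :: xs) = x :: F Bl xs := by
          simp only [F, dif_pos h]
        rw [e1, e2, ih xs.length (by omega) xs rfl]
        simp
      · have hA : goA Bl (x :: xs) r =
            goA Bl (takeOddRun Bl (x :: xs) false).2.2
              (if (takeOddRun Bl (x :: xs) false).2.1 then r ++ (takeOddRun Bl (x :: xs) false).1 else r) := by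
          simp only [goA, dif_neg h]
        have hF : F Bl (x :: xs) =
            (if (takeOddRun Bl (x :: xs) false).2.1 then (takeOddRun Bl (x :: xs) false).1 else []) ++
              F Bl (takeOddRun Bl (x :: xs) false).2.2 := by
          simp only [F, dif_neg h]
        have hlt := takeOddRun_rem_lt Bl x xs false h
        simp only [List.length_cons] at hlt
        rw [hA, ih _ (by omega) _ rfl, hF]
        by_cases hf : (takeOddRun Bl (x :: xs) false).2.1 = true <;> simp [hf]

-- flag carried by _sweep after processing a list
def flagEnd (Bl : List Int) : List Int → Bool → Bool
  | [], f => f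
  | x :: xs, f =>
    flagEnd Bl xs (if PySem.Int.mod x 2 == 0 then false
                   else if Bl.contains x then true else f)

theorem sweepB_length (Bl : List Int) : ∀ (xs : List Int) (f : Bool),
    (sweepB Bl xs f).length = xs.length := by
  intro xs
  induction xs with
  | nil => intro f; simp [sweepB]
  | cons x xs ih => intro f; simp [sweepB, ih]

theorem sweepB_append (Bl : List Int) : ∀ (ys zs : List Int) (f : Bool),
    sweepB Bl (ys ++ zs) f = sweepB Bl ys f ++ sweepB Bl zs (flagEnd Bl ys f) := by
  intro ys
  induction ys with
  | nil => intro zs f; simp [sweepB, flagEnd]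
  | cons y ys ih => intro zs f; simp [sweepB, flagEnd, ih]

theorem flagEnd_append (Bl : List Int) : ∀ (ys zs : List Int) (f : Bool),
    flagEnd Bl (ys ++ zs) f = flagEnd Bl zs (flagEnd Bl ys f) := by
  intro ys
  induction ys with
  | nil => intro zs f; simp [flagEnd]
  | cons y ys ih => intro zs f; simp [flagEnd, ih]

-- sweeping a list whose head is even (or the empty list) ignores the incoming flag
theorem sweepB_reset (Bl : List Int) (rest : List Int)
    (h : rest = [] ∨ ∃ y ys, rest = y :: ys ∧ (PySem.Int.mod y 2 == 0) = true) (f : Bool) :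
    sweepB Bl rest f = sweepB Bl rest false := by
  rcases h with h | ⟨y, ys, rfl, hy⟩
  · subst h; rfl
  · simp only [sweepB, hy, if_true]

theorem flagEnd_even_last (Bl : List Int) (ys : List Int) (x : Int)
    (hx : (PySem.Int.mod x 2 == 0) = true) (f : Bool) :
    flagEnd Bl (ys ++ [x]) f = false := by
  rw [flagEnd_append]
  simp only [flagEnd, hx, if_true]

theorem sweepB_odd_getElem (Bl : List Int) : ∀ (r : List Int),
    (∀ y ∈ r, oddP y = true) → ∀ (f : Bool) (i : Nat) (hi : i < r.length),
    (sweepB Bl r f)[i]'(by rw [sweepB_length]; exact hi)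
      = (f || (r.take (i+1)).any (fun e => Bl.contains e)) := by
  intro r
  induction r with
  | nil => intro _ f i hi; simp at hi
  | cons x r ih =>
    intro hodd f i hi
    have hx : (PySem.Int.mod x 2 == 0) = false := by
      have := hodd x (by simp); simpa [oddP] using this
    match i with
    | 0 =>
      simp only [sweepB, hx, Bool.false_eq_true, if_false, List.getElem_cons_zero,
        List.take_succ_cons, List.take_zero, List.any_cons, List.any_nil, Bool.or_false]
      exact boolIfOr _ _
    | i + 1 =>
      simp only [sweepB, hx, Bool.false_eq_true, if_false, List.getElem_cons_succ,
        List.take_succ_cons, List.any_cons]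
      rw [ih (fun y hy => hodd y (by simp [hy])) _ i (by simpa using hi)]
      exact boolIfOr' _ _ _

theorem zipFilterB_append : ∀ (xs : List Int) (fs gs : List Bool) (ys : List Int) (fs' gs' : List Bool),
    fs.length = xs.length → gs.length = xs.length →
    zipFilterB (xs ++ ys) (fs ++ fs') (gs ++ gs') =
      zipFilterB xs fs gs ++ zipFilterB ys fs' gs' := by
  intro xs
  induction xs with
  | nil =>
    intro fs gs ys fs' gs' hf hg
    rw [List.length_nil] at hf hg
    rw [List.eq_nil_of_length_eq_zero hf, List.eq_nil_of_length_eq_zero hg]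
    simp [zipFilterB]
  | cons x xs ih =>
    intro fs gs ys fs' gs' hf hg
    match fs, gs with
    | f :: fs, g :: gs =>
      simp only [List.length_cons] at hf hg
      simp only [List.cons_append, zipFilterB]
      rw [ih fs gs ys fs' gs' (by omega) (by omega)]
      split <;> simp
    | [], _ => simp at hf
    | _ :: _, [] => simp at hg

theorem zipFilterB_all_true : ∀ (xs : List Int) (fs gs : List Bool)
    (hf : fs.length = xs.length) (hg : gs.length = xs.length),
    (∀ (i : Nat) (hi : i < xs.length),
      ((PySem.Int.mod (xs[i]'hi) 2 == 0) || fs[i]'(by omega) || gs[i]'(by omega)) = true) →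
    zipFilterB xs fs gs = xs := by
  intro xs
  induction xs with
  | nil => intro fs gs _ _ _; cases fs <;> cases gs <;> simp [zipFilterB]
  | cons x xs ih =>
    intro fs gs hf hg hall
    match fs, gs with
    | f :: fs, g :: gs =>
      simp only [List.length_cons] at hf hg
      have h0 := hall 0 (by simp)
      simp only [List.getElem_cons_zero] at h0
      simp only [zipFilterB, h0, if_pos]
      rw [ih fs gs (by omega) (by omega)]
      intro i hi
      have := hall (i+1) (by simpa using hi)
      simpa using this
    | [], _ => simp at hf
    | _ :: _, [] => simp at hg

theorem zipFilterB_all_false : ∀ (xs : List Int) (fs gs : List Bool)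
    (hf : fs.length = xs.length) (hg : gs.length = xs.length),
    (∀ (i : Nat) (hi : i < xs.length),
      ((PySem.Int.mod (xs[i]'hi) 2 == 0) || fs[i]'(by omega) || gs[i]'(by omega)) = false) →
    zipFilterB xs fs gs = [] := by
  intro xs
  induction xs with
  | nil => intro fs gs _ _ _; cases fs <;> cases gs <;> simp [zipFilterB]
  | cons x xs ih =>
    intro fs gs hf hg hall
    match fs, gs with
    | f :: fs, g :: gs =>
      simp only [List.length_cons] at hf hg
      have h0 := hall 0 (by simp)
      simp only [List.getElem_cons_zero] at h0
      simp only [zipFilterB, h0, Bool.false_eq_true, if_false]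
      apply ih fs gs (by omega) (by omega)
      intro i hi
      have := hall (i+1) (by simpa using hi)
      simpa using this
    | [], _ => simp at hf
    | _ :: _, [] => simp at hg

-- the run-level behaviour of B's masks: an all-odd run is kept whole or dropped whole
theorem zipFilterB_run (Bl : List Int) (r : List Int) (hodd : ∀ y ∈ r, oddP y = true) :
    zipFilterB r (sweepB Bl r false) ((sweepB Bl r.reverse false).reverse) =
      (if r.any (fun e => Bl.contains e) then r else []) := by
  have hoddrev : ∀ y ∈ r.reverse, oddP y = true := fun y hy => hodd y (by simpa using hy)
  have hf : (sweepB Bl r false).length = r.length := sweepB_length Bl r false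
  have hg : ((sweepB Bl r.reverse false).reverse).length = r.length := by
    simp [sweepB_length]
  have hfwd : ∀ (i : Nat) (hi : i < r.length),
      (sweepB Bl r false)[i]'(by omega) = (r.take (i+1)).any (fun e => Bl.contains e) := by
    intro i hi
    rw [sweepB_odd_getElem Bl r hodd false i hi]
    simp
  have hbwd : ∀ (i : Nat) (hi : i < r.length),
      ((sweepB Bl r.reverse false).reverse)[i]'(by omega) = (r.drop i).any (fun e => Bl.contains e) := by
    intro i hi
    rw [List.getElem_reverse]
    have hlen : (sweepB Bl r.reverse false).length = r.length := by simp [sweepB_length]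
    have hi' : (sweepB Bl r.reverse false).length - 1 - i < r.reverse.length := by
      simp [hlen]; omega
    rw [sweepB_odd_getElem Bl r.reverse hoddrev false _ (by simpa using hi')]
    have harg : (sweepB Bl r.reverse false).length - 1 - i + 1 = r.length - i := by
      rw [hlen]; omega
    rw [harg]
    have htake : r.reverse.take (r.length - i) = (r.drop i).reverse := by
      have he : r.length - (r.length - i) = i := by omega
      rw [List.take_reverse, he]
    rw [htake]
    simp
  by_cases hmem : r.any (fun e => Bl.contains e) = true
  · rw [if_pos hmem]
    apply zipFilterB_all_true r _ _ hf hg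
    intro i hi
    have hodd_i : (PySem.Int.mod (r[i]'hi) 2 == 0) = false := by
      have := hodd (r[i]'hi) (List.getElem_mem hi)
      simpa [oddP] using this
    rw [hfwd i hi, hbwd i hi, hodd_i]
    have hmem2 : ((r.take (i+1)).any (fun e => Bl.contains e)
        || (r.drop (i+1)).any (fun e => Bl.contains e)) = true := by
      rw [← List.any_append, List.take_append_drop]
      exact hmem
    have hdrop : r.drop i = (r[i]'hi) :: r.drop (i+1) := List.drop_eq_getElem_cons hi
    rw [hdrop]
    simp only [List.any_cons]
    cases h1 : (r.take (i+1)).any (fun e => Bl.contains e)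
    · have h2 : (r.drop (i+1)).any (fun e => Bl.contains e) = true := by
        rw [h1] at hmem2
        simpa using hmem2
      rw [h2]
      simp only [Bool.or_true]
    · simp only [Bool.false_or, Bool.true_or]
  · rw [if_neg hmem]
    have hmem' : r.any (fun e => Bl.contains e) = false := by
      cases h : r.any (fun e => Bl.contains e)
      · rfl
      · exact absurd h hmem
    apply zipFilterB_all_false r _ _ hf hg
    intro i hi
    have hodd_i : (PySem.Int.mod (r[i]'hi) 2 == 0) = false := by
      have := hodd (r[i]'hi) (List.getElem_mem hi)
      simpa [oddP] using this
    rw [hfwd i hi, hbwd i hi, hodd_i]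
    have h1 : (r.take (i+1)).any (fun e => Bl.contains e) = false := by
      rw [List.any_eq_false] at hmem' ⊢
      exact fun y hy => hmem' y (List.mem_of_mem_take hy)
    have h2 : (r.drop i).any (fun e => Bl.contains e) = false := by
      rw [List.any_eq_false] at hmem' ⊢
      exact fun y hy => hmem' y (List.mem_of_mem_drop hy)
    rw [h1, h2]
    rfl

theorem alt_eq_F (Bl : List Int) : ∀ (n : Nat) (xs : List Int), xs.length = n →
    zipFilterB xs (sweepB Bl xs false) ((sweepB Bl xs.reverse false).reverse) = F Bl xs := by
  intro n
  induction n using Nat.strong_induction_on with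
  | _ n ih =>
    intro xs hlen
    match xs with
    | [] => simp [zipFilterB, F]
    | x :: xs =>
      have hlen' : xs.length + 1 = n := by simpa using hlen
      by_cases h : (PySem.Int.mod x 2 == 0) = true
      · -- even head: both masks start with false, element is kept, recurse
        have hfwd : sweepB Bl (x :: xs) false = false :: sweepB Bl xs false := by
          simp only [sweepB, h, if_true]
        have hbwd : sweepB Bl (x :: xs).reverse false
            = sweepB Bl xs.reverse false ++ [false] := by
          rw [List.reverse_cons, sweepB_append]
          congr 1
          simp only [sweepB, h, if_true]
        rw [hfwd, hbwd, List.reverse_append]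
        simp only [List.reverse_singleton, List.singleton_append]
        rw [show zipFilterB (x :: xs) (false :: sweepB Bl xs false)
              (false :: (sweepB Bl xs.reverse false).reverse)
            = x :: zipFilterB xs (sweepB Bl xs false) ((sweepB Bl xs.reverse false).reverse) by
          simp only [zipFilterB, h, Bool.true_or, if_true]]
        rw [ih xs.length (by omega) xs rfl]
        rw [show F Bl (x :: xs) = x :: F Bl xs by simp only [F, dif_pos h]]
      · -- odd head: split off the maximal odd run
        have hox : oddP x = true := by
          have hx0 : (PySem.Int.mod x 2 == 0) = false := Bool.eq_false_iff.mpr h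
          simp only [oddP, hx0, Bool.not_false]
        set run := (x :: xs).takeWhile oddP with hrun
        set rest := (x :: xs).dropWhile oddP with hrest
        have hsplit : run ++ rest = x :: xs := List.takeWhile_append_dropWhile
        have hrunodd : ∀ y ∈ run, oddP y = true := fun y hy => List.mem_takeWhile_imp hy
        have hrun_cons : run = x :: xs.takeWhile oddP := by
          rw [hrun, List.takeWhile_cons, if_pos hox]
        have hrest_eq : rest = xs.dropWhile oddP := by
          rw [hrest, List.dropWhile_cons, if_pos hox]
        have hrestlen : rest.length < n := by
          rw [hrest_eq, ← hlen]
          have := List.length_dropWhile_le (p := oddP) (l := xs)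
          simp only [List.length_cons]
          omega
        have hrestshape : rest = [] ∨ ∃ y ys, rest = y :: ys ∧ (PySem.Int.mod y 2 == 0) = true := by
          match hre : rest with
          | [] => exact Or.inl rfl
          | y :: ys =>
            refine Or.inr ⟨y, ys, rfl, ?_⟩
            have hdw : List.dropWhile oddP (x :: xs) = y :: ys := hrest.symm
            have hny : oddP y = false := by
              have := List.head?_dropWhile_not oddP (x :: xs)
              rw [hdw] at this
              simpa using this
            simpa [oddP] using hny
        -- decompose the forward mask
        have hfwd : sweepB Bl (x :: xs) false
            = sweepB Bl run false ++ sweepB Bl rest false := by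
          rw [← hsplit, sweepB_append, sweepB_reset Bl rest hrestshape]
        -- decompose the backward mask
        have hflagrev : flagEnd Bl rest.reverse false = false := by
          rcases hrestshape with hre | ⟨y, ys, hre, hy⟩
          · rw [hre]; rfl
          · rw [hre, List.reverse_cons]
            exact flagEnd_even_last Bl ys.reverse y hy false
        have hbwd : (sweepB Bl (x :: xs).reverse false).reverse
            = (sweepB Bl run.reverse false).reverse ++ (sweepB Bl rest.reverse false).reverse := by
          rw [← hsplit, List.reverse_append, sweepB_append, hflagrev, List.reverse_append]
        -- split the zip-filter at the run boundary
        have hzip : zipFilterB (x :: xs) (sweepB Bl (x :: xs) false)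
              ((sweepB Bl (x :: xs).reverse false).reverse)
            = zipFilterB run (sweepB Bl run false) ((sweepB Bl run.reverse false).reverse)
              ++ zipFilterB rest (sweepB Bl rest false) ((sweepB Bl rest.reverse false).reverse) := by
          rw [hfwd, hbwd, ← hsplit]
          exact zipFilterB_append run (sweepB Bl run false) ((sweepB Bl run.reverse false).reverse)
            rest (sweepB Bl rest false) ((sweepB Bl rest.reverse false).reverse)
            (sweepB_length Bl run false) (by simp [sweepB_length])
        rw [hzip, zipFilterB_run Bl run hrunodd, ih rest.length hrestlen rest rfl]
        -- and unfold F on the odd head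
        have hF : F Bl (x :: xs) =
            (if run.any (fun e => Bl.contains e) then run else []) ++ F Bl rest := by
          simp only [F, dif_neg h]
          rw [takeOddRun_eq]
          simp [hrun, hrest]
        rw [hF]

theorem contains_ofList (B : List Int) (x : Int) :
    (PySem.Set.ofList B).contains x = B.contains x := by
  by_cases hx : x ∈ B
  · have h1 : x ∈ PySem.Set.ofList B := (PySem.Set.mem_ofList B x).mpr hx
    simp [hx, h1]
  · have h1 : x ∉ PySem.Set.ofList B := fun hc => hx ((PySem.Set.mem_ofList B x).mp hc)
    simp [hx, h1]

theorem sweepB_congr (Bl Bl' : List Int) (hB : ∀ x, Bl.contains x = Bl'.contains x) :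
    ∀ (xs : List Int) (f : Bool), sweepB Bl xs f = sweepB Bl' xs f := by
  intro xs
  induction xs with
  | nil => intro f; rfl
  | cons x xs ih => intro f; simp only [sweepB, hB x, ih]

-- ===== VERDICT (by name: the statement is the Claim_ definition above) =====
theorem method_without_std_spec : Claim_equal_method_without_std := by
  intro A B _
  unfold Spec_method_without_std method_without_std method_without_std_alt
  rw [goA_eq_F B A.length A rfl []]
  simp only [sweepB_congr (PySem.Set.ofList B) B (contains_ofList B)]
  rw [alt_eq_F B A.length A rfl]
  simp
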